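-- pv_equiv track=rewrite | github.com/DaPotato69/BenWangMathsEnrichment2023 | math6.py | base9
-- ===== SOURCE A (Python) =====
-- def base9(x):
--     digits = [] #make empty list
--     base9_int = 0 #variable for num in base 9
--     while x > 0:
--         digits.append(x % 9)#working from right to left
--         x = int(x / 9)#divide x by 9 for next digit, and round down
--     for x in digits[::-1]:
--         base9_int = base9_int * 10 + x#convert to human readable and not just an array
--     return base9_int
-- ===== SOURCE B (Python) =====
-- def base9(x):
--     # Single-pass accumulator: no digit list, no reversal.
--     result = 0
--     place = 1
--     while x > 0:
--         result += (x % 9) * place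
--         place *= 10
--         x //= 9   # equals A's int(x / 9) for 0 <= x <= 2**31 (float division is exact there)
--     return result
-- ===== Notes on version B (the rewrite author's own statement) =====
-- stated objective: simpler
-- what changed: Replaced A's two-phase scheme (build a list of remainders, then fold over its reverse) with a single-pass accumulator that adds each digit times a running power of 10, needing no list at all.
import Mathlib
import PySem

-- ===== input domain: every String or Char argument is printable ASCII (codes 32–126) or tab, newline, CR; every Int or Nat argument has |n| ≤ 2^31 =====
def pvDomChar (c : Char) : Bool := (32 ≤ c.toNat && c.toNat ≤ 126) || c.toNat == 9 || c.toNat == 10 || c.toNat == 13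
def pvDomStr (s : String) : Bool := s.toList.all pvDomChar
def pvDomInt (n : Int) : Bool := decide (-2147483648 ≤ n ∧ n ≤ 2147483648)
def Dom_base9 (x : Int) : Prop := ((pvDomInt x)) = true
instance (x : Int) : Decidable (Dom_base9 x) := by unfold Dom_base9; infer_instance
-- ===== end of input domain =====

-- B replaces A's two-phase digit-list-then-reverse-fold with a single-pass accumulator (simpler, no list).


-- ===== PORT A =====
-- helper lemma the ports' termination proofs cite
theorem pv_floordiv9_toNat_lt (x : Int) (h : 0 < x) :
    (PySem.Int.floordiv x 9).toNat < x.toNat := by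
  rw [PySem.Int.floordiv_eq_ediv_of_pos (by omega)]
  omega

-- while loop 1 of A: collect remainders least-significant first.
-- On Dom (|x| ≤ 2^31 < 2^53) Python's int(x / 9) with x > 0 equals x // 9 exactly
-- (the float quotient truncates to the same integer), so it is ported as floordiv.
def base9Digits (x : Int) : List Int :=
  if h : 0 < x then
    PySem.Int.mod x 9 :: base9Digits (PySem.Int.floordiv x 9)
  else []
termination_by x.toNat
decreasing_by exact pv_floordiv9_toNat_lt x h

-- loop 2 of A: for d in digits[::-1]: base9_int = base9_int * 10 + d
def base9 (x : Int) : Int :=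
  ((PySem.List.slice? (base9Digits x) none none (-1)).getD []).foldl
    (fun acc d => acc * 10 + d) 0

-- ===== PORT B =====
-- single while loop of B, state (x, result, place)
def base9AltLoop (x result place : Int) : Int :=
  if h : 0 < x then
    base9AltLoop (PySem.Int.floordiv x 9) (result + PySem.Int.mod x 9 * place) (place * 10)
  else result
termination_by x.toNat
decreasing_by exact pv_floordiv9_toNat_lt x h

def base9_alt (x : Int) : Int := base9AltLoop x 0 1

-- ===== PRECONDITION & SPEC =====
def Spec_base9 (x : Int) (out : Int) : Prop := out = base9_alt x
instance (x : Int) (out : Int) : Decidable (Spec_base9 x out) := by unfold Spec_base9; infer_instance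

-- ===== CLAIM (what is proved, stated in full; the proofs are below) =====
def Claim_equal_base9 : Prop := ∀ (x : Int), Dom_base9 x → Spec_base9 x (base9 x)

-- ===== LEMMAS AND PROOFS =====

-- A's value satisfies the digit recurrence
theorem base9_rec (x : Int) :
    base9 x = if 0 < x then base9 (PySem.Int.floordiv x 9) * 10 + PySem.Int.mod x 9 else 0 := by
  have key : ∀ y, base9 y = (base9Digits y).reverse.foldl (fun acc d => acc * 10 + d) 0 := by
    intro y; unfold base9; rw [PySem.List.slice?_none_none_neg_one]; rfl
  rw [key x, base9Digits]
  split_ifs with h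
  · rw [key]
    simp [List.foldl_append]
  · simp

theorem base9AltLoop_eq (x : Int) : ∀ result place : Int,
    base9AltLoop x result place = result + place * base9 x := by
  induction hx : x.toNat using Nat.strong_induction_on generalizing x with
  | _ n ih =>
    intro result place
    rw [base9AltLoop, base9_rec x]
    split_ifs with h
    · rw [ih _ (hx ▸ pv_floordiv9_toNat_lt x h) _ rfl]
      ring
    · ring

-- ===== VERDICT (by name: the statement is the Claim_ definition above) =====
theorem base9_spec : Claim_equal_base9 := by
  intro x _
  unfold Spec_base9 base9_alt
  rw [base9AltLoop_eq]
  ring
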